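-- pv_equiv track=rewrite | github.com/GeoRacoon/GeoRacoon | src/landiv_blur/helper.py | match_any
-- ===== SOURCE A (Python) =====
-- def match_any(targets:dict, tags:dict)->bool:
--     # TODO: is_needed - no_work - is_tested - usedin_both
--     """Check if any tag in targets is present in tags
--     """
--     match = False
--     for t, v in targets.items():
--         if match:
--             break  # stop if there was a match
--         if t in tags:  # if tag is present check for value match
--             if tags[t] == v:
--                 match = True
--             else:  # if a value is different it is no match
--                 match = False
--         else:  # if a tag is absent it is no match
--             match = False
--     return match
-- ===== SOURCE B (Python) =====
-- def match_any(targets: dict, tags: dict) -> bool: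
--     """Check if any tag in targets is present in tags.
--
--     Sort both item lists and sweep them in lockstep (two-pointer merge
--     scan): a key/value pair shared by both dicts must meet as equal
--     heads of the two sorted sequences.
--     """
--     a = sorted(targets.items())
--     b = sorted(tags.items())
--     i = 0
--     j = 0
--     while i < len(a) and j < len(b):
--         if a[i] == b[j]:
--             return True
--         if a[i] < b[j]:
--             i += 1
--         else:
--             j += 1
--     return False
-- ===== Notes on version B (the rewrite author's own statement) =====
-- stated objective: alternative
-- what changed: Replaces A's stateful scan over targets with per-key dict lookups by a sort-then-merge scan: both item lists are sorted and swept in lockstep with two pointers until a common pair meets.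
import Mathlib
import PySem

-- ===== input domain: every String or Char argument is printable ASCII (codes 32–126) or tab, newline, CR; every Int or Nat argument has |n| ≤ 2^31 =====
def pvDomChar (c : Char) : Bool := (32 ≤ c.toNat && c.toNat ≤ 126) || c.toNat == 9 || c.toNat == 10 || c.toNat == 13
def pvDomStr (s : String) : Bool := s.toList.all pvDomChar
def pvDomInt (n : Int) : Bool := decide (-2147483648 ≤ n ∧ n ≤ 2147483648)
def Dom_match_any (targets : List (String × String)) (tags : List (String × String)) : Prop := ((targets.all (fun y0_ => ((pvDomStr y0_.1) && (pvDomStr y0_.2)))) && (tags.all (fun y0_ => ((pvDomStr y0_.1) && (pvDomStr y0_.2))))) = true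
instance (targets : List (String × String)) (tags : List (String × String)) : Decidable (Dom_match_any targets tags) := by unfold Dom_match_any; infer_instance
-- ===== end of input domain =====

-- B replaces A's stateful scan-with-break and per-key lookup by a sort-then-merge two-pointer scan over both item lists (alternative algorithm, O(n log n)).


-- ===== PORT A =====
-- loop body: 'if match: break' then 'if t in tags: match = (tags[t]==v) else: match = False'
def matchAnyLoop (tags : PySem.Dict String String) : List (String × String) → Bool → Bool
  | [], m => m
  | (t, v) :: rest, m =>
    if m then m  -- break: return current match
    else matchAnyLoop tags rest
      (match tags.get? t with   -- 't in tags' / 'tags[t]' combined: first-match lookup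
       | some w => w == v
       | none => false)

def match_any (targets : List (String × String)) (tags : List (String × String)) : Bool :=
  matchAnyLoop (PySem.Dict.mk tags) targets false

-- ===== PORT B =====
-- Python's '<' on a pair of strings: tuple comparison, lexicographic by components
-- (exact: Python compares str by code points = Lean's '<' on String, see PYSEM 'str COMPARISON').
def pairLt (a b : String × String) : Bool :=
  decide (a.1 < b.1) || (!decide (b.1 < a.1) && decide (a.2 < b.2))

-- the 'while i < len(a) and j < len(b)' two-pointer sweep, as structural recursion on the two suffixes
def mergeHas : List (String × String) → List (String × String) → Bool
  | [], _ => false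
  | _ :: _, [] => false
  | x :: xs, y :: ys =>
    if x == y then true                     -- 'if a[i] == b[j]: return True'
    else if pairLt x y then mergeHas xs (y :: ys)   -- 'if a[i] < b[j]: i += 1'
    else mergeHas (x :: xs) ys              -- 'else: j += 1'

-- 'a = sorted(targets.items()); b = sorted(tags.items()); <merge sweep>'
def match_any_alt (targets : List (String × String)) (tags : List (String × String)) : Bool :=
  mergeHas (PySem.List.sorted2 targets Prod.fst Prod.snd)
           (PySem.List.sorted2 tags Prod.fst Prod.snd)

-- ===== PRECONDITION & SPEC =====
-- Pre_ excludes only assoc lists whose key lists are not those of a Python dict: a Python dict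
-- never has duplicate keys, so this excludes no input the Python A actually accepts.
def Pre_match_any (targets : List (String × String)) (tags : List (String × String)) : Prop :=
  (tags.map Prod.fst).Nodup
instance (targets : List (String × String)) (tags : List (String × String)) : Decidable (Pre_match_any targets tags) := by unfold Pre_match_any; infer_instance

def pvWitness_match_any : (List (String × String)) × (List (String × String)) :=
  ([("a", "b")], [("a", "b"), ("c", "d")])

def Spec_match_any (targets : List (String × String)) (tags : List (String × String)) (out : Bool) : Prop := out = match_any_alt targets tags
instance (targets : List (String × String)) (tags : List (String × String)) (out : Bool) : Decidable (Spec_match_any targets tags out) := by unfold Spec_match_any; infer_instance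

-- ===== CLAIM (what is proved, stated in full; the proofs are below) =====
def Claim_equal_match_any : Prop := ∀ (targets : List (String × String)) (tags : List (String × String)), Dom_match_any targets tags → Pre_match_any targets tags → Spec_match_any targets tags (match_any targets tags)

-- ===== LEMMAS AND PROOFS =====

-- pairLt is the strict lexicographic order on pairs, in Prop form
theorem pairLt_iff (a b : String × String) :
    pairLt a b = true ↔ (a.1 < b.1 ∨ (¬ b.1 < a.1 ∧ a.2 < b.2)) := by
  simp [pairLt]

theorem pairLt_asymm (a b : String × String) (h : pairLt a b = true) : pairLt b a = false := by
  rw [pairLt_iff] at h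
  rw [Bool.eq_false_iff, Ne, pairLt_iff]
  rcases h with h | ⟨h1, h2⟩
  · rintro (h' | ⟨h1', _⟩) <;> [exact absurd h (lt_asymm h'); exact h1' h]
  · rintro (h' | ⟨_, h2'⟩) <;> [exact h1 h'; exact absurd h2 (lt_asymm h2')]

-- 'pairLt b a = false' is the lexicographic a ≤ b
theorem pairLt_false_iff (a b : String × String) :
    pairLt b a = false ↔ a.1 ≤ b.1 ∧ (b.1 ≤ a.1 → a.2 ≤ b.2) := by
  rw [Bool.eq_false_iff, Ne, pairLt_iff]
  simp only [not_or, not_and, not_lt]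

theorem pairLt_total (a b : String × String) (hab : pairLt b a = false)
    (hba : pairLt a b = false) : a = b := by
  rw [pairLt_false_iff] at hab hba
  have h1 : a.1 = b.1 := le_antisymm hab.1 hba.1
  exact Prod.ext h1 (le_antisymm (hab.2 h1.ge) (hba.2 h1.le))

-- transitivity of the reflexive order 'pairLt · · = false' (lex ≤)
theorem pairLt_false_trans (a b c : String × String)
    (hab : pairLt b a = false) (hbc : pairLt c b = false) : pairLt c a = false := by
  rw [pairLt_false_iff] at hab hbc ⊢
  refine ⟨hab.1.trans hbc.1, fun h => ?_⟩
  have h1 : a.1 = b.1 := le_antisymm hab.1 (hbc.1.trans h)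
  have h2 : b.1 = c.1 := le_antisymm hbc.1 (h.trans hab.1)
  exact (hab.2 h1.ge).trans (hbc.2 h2.ge)

-- the sorted lists are in weakly increasing lex order
theorem sorted2_eq_foldl (xs : List (String × String)) :
    PySem.List.sorted2 xs Prod.fst Prod.snd false
      = xs.foldl (fun acc x => PySem.List.insertBy pairLt x acc) [] := rfl

theorem insertBy_pairwise (x : String × String) (ys : List (String × String))
    (h : ys.Pairwise (fun a b => pairLt b a = false)) :
    (PySem.List.insertBy pairLt x ys).Pairwise (fun a b => pairLt b a = false) := by
  induction ys with
  | nil => simp [PySem.List.insertBy]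
  | cons y ys ih =>
    rw [List.pairwise_cons] at h
    by_cases hxy : pairLt x y = true
    · rw [PySem.List.insertBy, if_pos hxy]
      refine List.Pairwise.cons (fun z hz => ?_) (List.pairwise_cons.mpr h)
      rcases List.mem_cons.mp hz with rfl | hz
      · exact pairLt_asymm _ _ hxy
      · exact pairLt_false_trans _ _ _ (pairLt_asymm _ _ hxy) (h.1 z hz)
    · rw [PySem.List.insertBy, if_neg hxy]
      refine List.Pairwise.cons (fun z hz => ?_) (ih h.2)
      rcases (PySem.List.mem_insertBy pairLt x z ys).mp hz with rfl | hz
      · exact Bool.eq_false_iff.mpr hxy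
      · exact h.1 z hz

theorem sorted2_pairwise (xs : List (String × String)) :
    (PySem.List.sorted2 xs Prod.fst Prod.snd false).Pairwise (fun a b => pairLt b a = false) := by
  rw [sorted2_eq_foldl]
  suffices h : ∀ (acc : List (String × String)),
      acc.Pairwise (fun a b => pairLt b a = false) →
      (xs.foldl (fun acc x => PySem.List.insertBy pairLt x acc) acc).Pairwise
        (fun a b => pairLt b a = false) from h [] (by simp)
  induction xs with
  | nil => intro acc hacc; simpa using hacc
  | cons x xs ih => intro acc hacc; exact ih _ (insertBy_pairwise x acc hacc)

-- the merge sweep on two sorted lists finds exactly a shared element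
theorem mergeHas_iff (a b : List (String × String))
    (ha : a.Pairwise (fun p q => pairLt q p = false))
    (hb : b.Pairwise (fun p q => pairLt q p = false)) :
    mergeHas a b = true ↔ ∃ p, p ∈ a ∧ p ∈ b := by
  induction a generalizing b with
  | nil => simp [mergeHas]
  | cons x xs iha =>
    induction b with
    | nil => simp [mergeHas]
    | cons y ys ihb =>
      rw [List.pairwise_cons] at ha hb
      by_cases hxy : x = y
      · subst hxy
        simp [mergeHas]
      · have hbeq : (x == y) = false := by simpa using hxy
        by_cases hlt : pairLt x y = true
        · -- x < y lexicographically, so x ∉ y :: ys; drop x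
          rw [mergeHas, if_neg (by simp [hbeq]), if_pos hlt,
            iha (y :: ys) ha.2 (List.pairwise_cons.mpr hb)]
          constructor
          · rintro ⟨p, hp1, hp2⟩; exact ⟨p, List.mem_cons_of_mem _ hp1, hp2⟩
          · rintro ⟨p, hp1, hp2⟩
            rcases List.mem_cons.mp hp1 with rfl | hp1
            · -- p = x ∈ y :: ys contradicts x < y
              rcases List.mem_cons.mp hp2 with rfl | hp2
              · exact absurd rfl hxy
              · exact absurd hlt (by simp [hb.1 p hp2])
            · exact ⟨p, hp1, hp2⟩
        · -- y < x (since x ≠ y), so y ∉ x :: xs; drop y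
          rw [mergeHas, if_neg (by simp [hbeq]), if_neg hlt, ihb hb.2]
          constructor
          · rintro ⟨p, hp1, hp2⟩; exact ⟨p, hp1, List.mem_cons_of_mem _ hp2⟩
          · rintro ⟨p, hp1, hp2⟩
            rcases List.mem_cons.mp hp2 with rfl | hp2
            · rcases List.mem_cons.mp hp1 with rfl | hp1
              · exact absurd rfl hxy
              · -- p = y ∈ xs: then pairLt y x = false and pairLt x y = false, so x = y
                exact absurd (pairLt_total x p (ha.1 p hp1) (Bool.eq_false_iff.mpr hlt)) hxy
            · exact ⟨p, hp1, hp2⟩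

-- A's loop computes 'm || any target pair matches'
theorem matchAnyLoop_eq_any (tags : PySem.Dict String String) (l : List (String × String)) (m : Bool) :
    matchAnyLoop tags l m = (m || l.any (fun p => tags.get? p.1 == some p.2)) := by
  induction l generalizing m with
  | nil => simp [matchAnyLoop]
  | cons p rest ih =>
    obtain ⟨t, v⟩ := p
    by_cases hm : m
    · simp [matchAnyLoop, hm]
    · simp only [Bool.not_eq_true] at hm
      subst hm
      rw [matchAnyLoop, if_neg (by simp), ih]
      cases h : tags.get? t with
      | none => simp [h]
      | some w => simp [h]

theorem match_any_eq_true_iff (targets tags : List (String × String))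
    (h : (tags.map Prod.fst).Nodup) :
    match_any targets tags = true ↔ ∃ p, p ∈ targets ∧ p ∈ tags := by
  unfold match_any
  rw [matchAnyLoop_eq_any]
  simp only [Bool.false_or, List.any_eq_true, beq_iff_eq]
  constructor
  · rintro ⟨⟨t, v⟩, hmem, hget⟩
    exact ⟨(t, v), hmem, PySem.Dict.mem_items_of_get?_eq_some (PySem.Dict.mk tags) hget⟩
  · rintro ⟨⟨t, v⟩, hmem, htag⟩
    refine ⟨(t, v), hmem, ?_⟩
    exact PySem.Dict.get?_of_mem_items (PySem.Dict.mk tags) htag (by simpa [PySem.Dict.keys] using h)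

theorem match_any_alt_eq_true_iff (targets tags : List (String × String)) :
    match_any_alt targets tags = true ↔ ∃ p, p ∈ targets ∧ p ∈ tags := by
  unfold match_any_alt
  rw [mergeHas_iff _ _ (sorted2_pairwise targets) (sorted2_pairwise tags)]
  constructor
  · rintro ⟨p, hp1, hp2⟩
    exact ⟨p, (PySem.List.sorted2_perm targets Prod.fst Prod.snd false).mem_iff.mp hp1,
              (PySem.List.sorted2_perm tags Prod.fst Prod.snd false).mem_iff.mp hp2⟩
  · rintro ⟨p, hp1, hp2⟩
    exact ⟨p, (PySem.List.sorted2_perm targets Prod.fst Prod.snd false).mem_iff.mpr hp1,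
              (PySem.List.sorted2_perm tags Prod.fst Prod.snd false).mem_iff.mpr hp2⟩

-- ===== VERDICT (by name: the statement is the Claim_ definition above) =====
theorem match_any_spec : Claim_equal_match_any := by
  intro targets tags _ hpre
  unfold Spec_match_any
  rw [Bool.eq_iff_iff, match_any_eq_true_iff targets tags hpre, match_any_alt_eq_true_iff]
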